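-- pv_equiv track=rewrite | github.com/mihainadas/calcgpt | lib/dategen.py | generate_valid_numbers
-- ===== SOURCE A (Python) =====
-- from typing import List, Set, Generator, Dict, Any, Tuple
--
-- def contains_only_allowed_digits(number: int, allowed_digits: Set[str]) -> bool:
--     """Check if a number contains only the allowed digits."""
--     if allowed_digits is None:
--         return True
--     return all(digit in allowed_digits for digit in str(number))
--
-- def generate_valid_numbers(max_value: int, allowed_digits: Set[str] = None, min_value: int = 0) -> List[int]:
--     """Generate list of valid numbers based on constraints."""
--     if allowed_digits is None:
--         numbers = list(range(min_value, max_value + 1))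
--         return numbers
--
--     valid_numbers = []
--     for i in range(min_value, max_value + 1):
--         if contains_only_allowed_digits(i, allowed_digits):
--             valid_numbers.append(i)
--
--     return valid_numbers
-- ===== SOURCE B (Python) =====
-- def _digits_ok(i, allowed_digits):
--     if i < 0:
--         if '-' not in allowed_digits:
--             return False
--         i = -i
--     if i == 0:
--         return '0' in allowed_digits
--     while i > 0:
--         i, r = divmod(i, 10)
--         if chr(48 + r) not in allowed_digits:
--             return False
--     return True
--
-- def generate_valid_numbers(max_value, allowed_digits=None, min_value=0):
--     if allowed_digits is None:
--         return list(range(min_value, max_value + 1))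
--     out = []
--     for i in range(max_value, min_value - 1, -1):
--         if _digits_ok(i, allowed_digits):
--             out.append(i)
--     out.reverse()
--     return out
-- ===== Notes on version B (the rewrite author's own statement) =====
-- stated objective: alternative
-- what changed: The per-number check extracts decimal digits arithmetically with divmod (handling the sign explicitly) instead of converting each number to a string, and the range is scanned downward with the result built back-to-front and reversed once.
import Mathlib
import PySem

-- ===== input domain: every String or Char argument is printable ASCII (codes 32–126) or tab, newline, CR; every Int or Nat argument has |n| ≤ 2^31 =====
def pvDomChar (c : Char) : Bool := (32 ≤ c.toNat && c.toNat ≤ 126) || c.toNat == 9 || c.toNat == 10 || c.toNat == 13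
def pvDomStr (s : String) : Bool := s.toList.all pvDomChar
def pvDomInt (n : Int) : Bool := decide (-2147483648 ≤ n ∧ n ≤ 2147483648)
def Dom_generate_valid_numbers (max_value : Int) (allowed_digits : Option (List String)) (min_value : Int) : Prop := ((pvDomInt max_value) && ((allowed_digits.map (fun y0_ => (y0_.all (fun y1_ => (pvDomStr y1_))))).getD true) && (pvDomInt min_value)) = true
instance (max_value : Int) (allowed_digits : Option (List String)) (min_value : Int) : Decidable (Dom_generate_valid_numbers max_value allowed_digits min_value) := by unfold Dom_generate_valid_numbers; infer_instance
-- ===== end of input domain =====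

-- B replaces the per-number string conversion by arithmetic digit extraction (divmod, sign handled
-- explicitly) and scans the range downward, reversing the accumulated result once; objective: alternative.

-- ===== PORT A =====
def contains_only_allowed_digits (number : Int) (allowed_digits : Option (List String)) : Bool :=
  match allowed_digits with
  | none => true
  | some s => (PySem.Int.toChars number).all (fun c => s.contains (String.ofList [c]))

def generate_valid_numbers (max_value : Int) (allowed_digits : Option (List String)) (min_value : Int) : List Int :=
  match allowed_digits with
  | none => PySem.List.pyRange min_value (max_value + 1) 1
  | some _ =>
    (PySem.List.pyRange min_value (max_value + 1) 1).foldl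
      (fun acc i => if contains_only_allowed_digits i allowed_digits then acc ++ [i] else acc) []

-- ===== PORT B =====
-- the 'while i > 0: i, r = divmod(i, 10); if chr(48 + r) not in allowed: return False' loop of Source B
def pvDigitsLoop (n : Nat) (allowed : List String) : Bool :=
  if h : n = 0 then true
  else if allowed.contains (String.ofList [Char.ofNat (48 + n % 10)]) then pvDigitsLoop (n / 10) allowed
  else false
decreasing_by exact Nat.div_lt_self (Nat.pos_of_ne_zero h) (by omega)

def pvDigitsOk (i : Int) (allowed : List String) : Bool :=
  if i < 0 then
    if allowed.contains "-" then pvDigitsOkAbs (-i) allowed else false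
  else pvDigitsOkAbs i allowed
where
  pvDigitsOkAbs (j : Int) (allowed : List String) : Bool :=
    if j = 0 then allowed.contains "0" else pvDigitsLoop j.toNat allowed

def generate_valid_numbers_alt (max_value : Int) (allowed_digits : Option (List String)) (min_value : Int) : List Int :=
  match allowed_digits with
  | none => PySem.List.pyRange min_value (max_value + 1) 1
  | some s =>
    ((PySem.List.pyRange max_value (min_value - 1) (-1)).foldl
      (fun acc i => if pvDigitsOk i s then acc ++ [i] else acc) []).reverse

-- ===== PRECONDITION & SPEC =====
def Spec_generate_valid_numbers (max_value : Int) (allowed_digits : Option (List String)) (min_value : Int) (out : List Int) : Prop := out = generate_valid_numbers_alt max_value allowed_digits min_value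
instance (max_value : Int) (allowed_digits : Option (List String)) (min_value : Int) (out : List Int) : Decidable (Spec_generate_valid_numbers max_value allowed_digits min_value out) := by unfold Spec_generate_valid_numbers; infer_instance

-- ===== CLAIM (what is proved, stated in full; the proofs are below) =====
def Claim_equal_generate_valid_numbers : Prop := ∀ (max_value : Int) (allowed_digits : Option (List String)) (min_value : Int), Dom_generate_valid_numbers max_value allowed_digits min_value → Spec_generate_valid_numbers max_value allowed_digits min_value (generate_valid_numbers max_value allowed_digits min_value)

-- ===== LEMMAS AND PROOFS =====

theorem pvOfNat_digitChar (r : Nat) (h : r < 10) : Char.ofNat (48 + r) = Nat.digitChar r := by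
  interval_cases r <;> rfl

-- the arithmetic digit loop checks exactly the characters str() would produce, for positive n
theorem pvDigitsLoop_eq_all (s : List String) (n : Nat) (hn : 0 < n) :
    pvDigitsLoop n s = (Nat.toDigits 10 n).all (fun c => s.contains (String.ofList [c])) := by
  induction n using Nat.strong_induction_on with
  | _ n ih =>
    rw [pvDigitsLoop]
    have hne : ¬ n = 0 := by omega
    simp only [hne, dite_false]
    rw [pvOfNat_digitChar (n % 10) (by omega)]
    by_cases hlt : n < 10
    · rw [Nat.toDigits_of_lt_base hlt]
      have h10 : n % 10 = n := Nat.mod_eq_of_lt hlt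
      have h0 : n / 10 = 0 := Nat.div_eq_of_lt hlt
      rw [h10, h0, pvDigitsLoop]
      simp
    · rw [Nat.toDigits_of_base_le (by omega) (by omega)]
      have hpos : 0 < n / 10 := Nat.div_pos (by omega) (by omega)
      rw [ih (n / 10) (Nat.div_lt_self hn (by omega)) hpos]
      simp [List.all_append, Bool.and_comm]

theorem pvDigitsOk_eq (s : List String) (i : Int) :
    pvDigitsOk i s = contains_only_allowed_digits i (some s) := by
  unfold pvDigitsOk contains_only_allowed_digits PySem.Int.toChars
  by_cases hneg : i < 0
  · simp only [hneg, if_true]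
    have habs : (0 : Int) < -i := by omega
    have hne : ¬ (-i = 0) := by omega
    unfold pvDigitsOk.pvDigitsOkAbs
    simp only [hne, if_false]
    have hnat : (-i).toNat = i.natAbs := by omega
    have hpos : 0 < i.natAbs := by omega
    rw [show ("-" : String) = String.ofList ['-'] from rfl]
    rw [hnat, pvDigitsLoop_eq_all s _ hpos, List.all_cons]
    cases hc : s.contains (String.ofList ['-']) <;> simp_all
  · simp only [hneg, if_false]
    unfold pvDigitsOk.pvDigitsOkAbs
    by_cases h0 : i = 0
    · subst h0
      rw [show ("0" : String) = String.ofList ['0'] from rfl]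
      simp [Nat.toDigits_zero]
    · have hpos : 0 < i.toNat := by omega
      simp only [h0, if_false]
      rw [pvDigitsLoop_eq_all s _ hpos]

-- ===== VERDICT (by name: the statement is the Claim_ definition above) =====
theorem generate_valid_numbers_spec : Claim_equal_generate_valid_numbers := by
  intro mx ad mn _
  unfold Spec_generate_valid_numbers
  cases ad with
  | none => rfl
  | some s =>
    simp only [generate_valid_numbers, generate_valid_numbers_alt]
    rw [PySem.List.foldl_append_if_eq_filter, PySem.List.foldl_append_if_eq_filter]
    have hsplit : mn - 1 + 1 = mn := by ring
    rw [PySem.List.pyRange_neg_one_eq_reverse, hsplit]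
    rw [List.filter_reverse]
    simp only [List.nil_append, List.reverse_reverse]
    exact (List.filter_congr (fun i _ => by rw [pvDigitsOk_eq])).symm
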